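-- pv_equiv track=rewrite | github.com/AdamZhouSE/pythonHomework | Code/CodeRecords/2178/60708/245170.py | find
-- ===== SOURCE A (Python) =====
-- def find(i,str):
--     str=str[0:i+1]
--     number=0;
--     cut=[]
--     length=1
--     while(length<=len(str)):
--         for n in range(0,len(str)-length+1):
--             temp=str[n:n+length]
--             cut.append(temp)
--         length=length+1
--         cut= list(set(cut))
--     return len(cut)
-- ===== SOURCE B (Python) =====
-- def _lcp(a, b):
--     # length of the longest common prefix of strings a and b
--     c = 0
--     m = min(len(a), len(b))
--     while c < m and a[c] == b[c]:
--         c = c + 1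
--     return c
--
--
-- def find(i, str):
--     # Count distinct substrings without ever materialising a substring set:
--     # every distinct substring is counted at its leftmost starting position k,
--     # where the number of new substrings is len(s[k:]) minus the longest
--     # common prefix of s[k:] with any earlier suffix s[j:] (j < k).
--     s = str[0:i + 1]
--     n = len(s)
--     total = 0
--     for k in range(n):
--         m = 0
--         for j in range(k):
--             m = max(m, _lcp(s[j:], s[k:]))
--         total += n - k - m
--     return total
-- ===== Notes on version B (the rewrite author's own statement) =====
-- stated objective: alternative
-- what changed: B never enumerates or stores substrings at all: it counts each distinct substring at its leftmost start, adding for every position k the suffix length minus the maximum longest-common-prefix of s[k:] with the earlier suffixes, instead of A's building and re-deduplicating a list of all substrings length by length.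
import Mathlib
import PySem

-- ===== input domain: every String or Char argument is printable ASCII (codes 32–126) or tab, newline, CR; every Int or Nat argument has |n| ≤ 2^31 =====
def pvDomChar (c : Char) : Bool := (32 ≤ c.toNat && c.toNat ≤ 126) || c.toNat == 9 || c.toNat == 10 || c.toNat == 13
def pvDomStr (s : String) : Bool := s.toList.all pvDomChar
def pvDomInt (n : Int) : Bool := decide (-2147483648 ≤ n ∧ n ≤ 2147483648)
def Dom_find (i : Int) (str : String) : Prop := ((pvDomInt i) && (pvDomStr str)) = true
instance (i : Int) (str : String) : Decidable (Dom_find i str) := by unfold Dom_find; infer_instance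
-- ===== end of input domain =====

-- B counts each distinct substring at its leftmost start via longest-common-prefix
-- scans of suffixes, never materialising any substring set, instead of A's
-- repeated list deduplication.

-- ===== PORT A =====
-- inner 'for n in range(0, len(str)-length+1): cut.append(str[n:n+length])'
def roundA (s : List Char) (len_ : Nat) (cut : List (List Char)) : List (List Char) :=
  (List.range (s.length - len_ + 1)).foldl
    (fun cut (n : Nat) => cut ++ [PySem.List.slice s (some (n : Int)) (some ((n : Int) + (len_ : Int)))]) cut

-- the 'while length <= len(str)' loop: append a round, increment, dedup ('cut = list(set(cut))')
def findLoopA (s : List Char) (cut : List (List Char)) (len_ : Nat) : List (List Char) :=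
  if _h : len_ ≤ s.length then
    findLoopA s (PySem.Set.ofList (roundA s len_ cut)) (len_ + 1)
  else cut
termination_by s.length + 1 - len_
decreasing_by omega

def find (i : Int) (str : String) : Int :=
  let s := PySem.List.slice str.toList (some 0) (some (i + 1))
  ((findLoopA s [] 1).length : Int)

-- ===== PORT B =====
-- '_lcp(a, b)': the while loop 'while c < min(len(a),len(b)) and a[c]==b[c]: c += 1'
-- as the obvious structural recursion over the two lists
def lcpB : List Char → List Char → Nat
  | a :: as, b :: bs => if a = b then lcpB as bs + 1 else 0
  | _, _ => 0

def find_alt (i : Int) (str : String) : Int :=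
  let s := PySem.List.slice str.toList (some 0) (some (i + 1))
  let n := s.length
  -- 'for k in range(n): m = 0; for j in range(k): m = max(m, _lcp(s[j:], s[k:])); total += n - k - m'
  (List.range n).foldl
    (fun total (k : Nat) =>
      let m : Nat := (List.range k).foldl
        (fun m (j : Nat) => max m (lcpB (PySem.List.slice s (some ((j : Nat) : Int)) none)
                                (PySem.List.slice s (some ((k : Nat) : Int)) none))) 0
      total + ((n : Int) - (k : Int) - (m : Int))) 0

-- ===== PRECONDITION & SPEC =====
def Spec_find (i : Int) (str : String) (out : Int) : Prop := out = find_alt i str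
instance (i : Int) (str : String) (out : Int) : Decidable (Spec_find i str out) := by unfold Spec_find; infer_instance

-- ===== CLAIM (what is proved, stated in full; the proofs are below) =====
def Claim_equal_find : Prop := ∀ (i : Int) (str : String), Dom_find i str → Spec_find i str (find i str)

-- ===== LEMMAS AND PROOFS =====

-- the list of length-len_ substrings of s, in start order
def subsOfLen (s : List Char) (len_ : Nat) : List (List Char) :=
  (List.range (s.length - len_ + 1)).map (fun n => (s.drop n).take len_)

theorem subsOfLen_eq_map_slice (s : List Char) (len_ : Nat) :
    (List.range (s.length - len_ + 1)).map
      (fun n : Nat => PySem.List.slice s (some (n : Int)) (some ((n : Int) + (len_ : Int)))) =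
      subsOfLen s len_ := by
  apply List.map_congr_left
  intro n _
  exact PySem.List.slice_natCast_add s n len_

theorem roundA_eq (s : List Char) (len_ : Nat) (cut : List (List Char)) :
    roundA s len_ cut = cut ++ subsOfLen s len_ := by
  rw [roundA, PySem.List.foldl_append_singleton_eq_map, subsOfLen_eq_map_slice]

theorem length_of_mem_subsOfLen (s : List Char) (len_ : Nat) (hle : len_ ≤ s.length)
    (y : List Char) (hy : y ∈ subsOfLen s len_) : y.length = len_ := by
  obtain ⟨n, hn, rfl⟩ := List.mem_map.1 hy
  have hn' : n < s.length - len_ + 1 := List.mem_range.1 hn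
  simp only [List.length_take, List.length_drop]
  omega

theorem ofList_append_of_disjoint (cut round : List (List Char)) (hnd : cut.Nodup)
    (hd : ∀ y ∈ round, y ∉ cut) :
    PySem.Set.ofList (cut ++ round) = cut ++ PySem.Set.ofList round := by
  rw [PySem.Set.ofList_append, PySem.Set.update_eq_append_filter,
    PySem.Set.ofList_eq_self_of_nodup cut hnd]
  congr 1
  apply List.filter_eq_self.2
  intro y hy
  have : y ∉ cut := hd y ((PySem.Set.mem_ofList _ _).1 hy)
  simp [PySem.Set.contains, this]

theorem loopA_length (s : List Char) (fuel : Nat) : ∀ len_ : Nat, s.length + 1 - len_ = fuel →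
    1 ≤ len_ → ∀ cut : List (List Char), cut.Nodup → (∀ y ∈ cut, y.length < len_) →
    (findLoopA s cut len_).length =
      cut.length + ((List.range' len_ fuel).map
        (fun l => (PySem.Set.ofList (subsOfLen s l)).length)).sum := by
  induction fuel with
  | zero =>
    intro len_ hf _ cut _ _
    rw [findLoopA, dif_neg (by omega)]
    simp
  | succ fuel ih =>
    intro len_ hf h1 cut hnd hlt
    have hle : len_ ≤ s.length := by omega
    rw [findLoopA, dif_pos hle, roundA_eq]
    have hdisj : ∀ y ∈ subsOfLen s len_, y ∉ cut := by
      intro y hy hmem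
      have := length_of_mem_subsOfLen s len_ hle y hy
      have := hlt y hmem
      omega
    rw [ofList_append_of_disjoint cut _ hnd hdisj]
    have hnd' : (cut ++ PySem.Set.ofList (subsOfLen s len_)).Nodup := by
      refine List.Nodup.append hnd (PySem.Set.nodup_ofList _) ?_
      intro y hy hy'
      exact hdisj y ((PySem.Set.mem_ofList _ _).1 hy') hy
    have hlt' : ∀ y ∈ cut ++ PySem.Set.ofList (subsOfLen s len_), y.length < len_ + 1 := by
      intro y hy
      rcases List.mem_append.1 hy with h | h
      · have := hlt y h; omega
      · have := length_of_mem_subsOfLen s len_ hle y ((PySem.Set.mem_ofList _ _).1 h); omega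
    rw [ih (len_ + 1) (by omega) (by omega) _ hnd' hlt']
    rw [List.range'_succ]
    simp [List.length_append]
    omega

-- ---------- B-side vocabulary ----------

-- substrings starting at k: the takes of the suffix s.drop k, lengths 1..(n-k)
def startsAt (s : List Char) (k : Nat) : Finset (List Char) :=
  (Finset.Icc 1 (s.length - k)).image (fun L => (s.drop k).take L)

-- union over the first K starting positions
def uptoU (s : List Char) (K : Nat) : Finset (List Char) :=
  (Finset.range K).biUnion (startsAt s)

-- the max-lcp accumulator of B's inner loop, on drops
def mB (s : List Char) (k : Nat) : Nat :=
  (List.range k).foldl (fun m j => max m (lcpB (s.drop j) (s.drop k))) 0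

-- ---------- lcp lemmas ----------

theorem lcpB_le_left (a b : List Char) : lcpB a b ≤ a.length := by
  induction a generalizing b with
  | nil => cases b <;> simp [lcpB]
  | cons x as ih =>
    cases b with
    | nil => simp [lcpB]
    | cons y bs =>
      by_cases h : x = y
      · simp only [lcpB, if_pos h, List.length_cons]
        exact Nat.add_le_add_right (ih bs) 1
      · simp [lcpB, h]

theorem lcpB_le_right (a b : List Char) : lcpB a b ≤ b.length := by
  induction a generalizing b with
  | nil => cases b <;> simp [lcpB]
  | cons x as ih =>
    cases b with
    | nil => simp [lcpB]
    | cons y bs =>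
      by_cases h : x = y
      · simp only [lcpB, if_pos h, List.length_cons]
        exact Nat.add_le_add_right (ih bs) 1
      · simp [lcpB, h]

theorem take_eq_of_le_lcpB (a b : List Char) (L : Nat) (h : L ≤ lcpB a b) :
    a.take L = b.take L := by
  induction a generalizing b L with
  | nil =>
    cases b <;> simp [lcpB] at h <;> simp [h]
  | cons x as ih =>
    cases b with
    | nil => simp [lcpB] at h; simp [h]
    | cons y bs =>
      by_cases hx : x = y
      · cases L with
        | zero => simp
        | succ L' =>
          simp only [lcpB, if_pos hx] at h
          simp [List.take_succ_cons, hx, ih bs L' (by omega)]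
      · simp [lcpB, hx] at h
        simp [h]

theorem le_lcpB_of_take_eq (a b : List Char) (L : Nat) (h : a.take L = b.take L)
    (hL : L ≤ a.length) : L ≤ lcpB a b := by
  induction a generalizing b L with
  | nil => simp at hL; omega
  | cons x as ih =>
    cases L with
    | zero => omega
    | succ L' =>
      cases b with
      | nil => simp at h
      | cons y bs =>
        simp only [List.take_succ_cons, List.cons.injEq] at h
        obtain ⟨rfl, htl⟩ := h
        have := ih bs L' htl (by simpa using hL)
        simp [lcpB]
        omega

-- ---------- fold-max lemmas ----------

theorem natFoldMax_succ (f : Nat → Nat) (k : Nat) :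
    (List.range (k+1)).foldl (fun m j => max m (f j)) 0 =
      max ((List.range k).foldl (fun m j => max m (f j)) 0) (f k) := by
  rw [List.range_succ, List.foldl_append]
  rfl

theorem le_natFoldMax (f : Nat → Nat) (k j : Nat) (hj : j < k) :
    f j ≤ (List.range k).foldl (fun m j => max m (f j)) 0 := by
  induction k with
  | zero => omega
  | succ k ih =>
    rw [natFoldMax_succ]
    rcases Nat.lt_succ_iff_lt_or_eq.1 hj with h | rfl
    · exact le_trans (ih h) (Nat.le_max_left _ _)
    · exact Nat.le_max_right _ _

theorem natFoldMax_cases (f : Nat → Nat) (k : Nat) :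
    (List.range k).foldl (fun m j => max m (f j)) 0 = 0 ∨
      ∃ j < k, (List.range k).foldl (fun m j => max m (f j)) 0 = f j := by
  induction k with
  | zero => left; simp
  | succ k ih =>
    rw [natFoldMax_succ]
    rcases Nat.le_total ((List.range k).foldl (fun m j => max m (f j)) 0) (f k) with hle | hle
    · right
      exact ⟨k, by omega, by omega⟩
    · rcases ih with h | ⟨j, hj, hjeq⟩
      · left; omega
      · right; exact ⟨j, by omega, by omega⟩

theorem le_mB_of_lt (s : List Char) (k j : Nat) (hj : j < k) :
    lcpB (s.drop j) (s.drop k) ≤ mB s k :=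
  le_natFoldMax (fun j => lcpB (s.drop j) (s.drop k)) k j hj

theorem mB_cases (s : List Char) (k : Nat) :
    mB s k = 0 ∨ ∃ j < k, mB s k = lcpB (s.drop j) (s.drop k) :=
  natFoldMax_cases (fun j => lcpB (s.drop j) (s.drop k)) k

theorem mB_le (s : List Char) (k : Nat) : mB s k ≤ s.length - k := by
  rcases mB_cases s k with h | ⟨j, _, h⟩
  · omega
  · rw [h]
    have := lcpB_le_right (s.drop j) (s.drop k)
    simpa using this

-- ---------- set-counting lemmas ----------

theorem mem_startsAt (s : List Char) (k : Nat) (p : List Char) :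
    p ∈ startsAt s k ↔ ∃ L, 1 ≤ L ∧ L ≤ s.length - k ∧ p = (s.drop k).take L := by
  simp only [startsAt, Finset.mem_image, Finset.mem_Icc]
  constructor
  · rintro ⟨L, ⟨h1, h2⟩, rfl⟩; exact ⟨L, h1, h2, rfl⟩
  · rintro ⟨L, h1, h2, rfl⟩; exact ⟨L, ⟨h1, h2⟩, rfl⟩

theorem startsAt_sdiff (s : List Char) (k : Nat) (_hk : k < s.length) :
    startsAt s k \ uptoU s k =
      (Finset.Icc (mB s k + 1) (s.length - k)).image (fun L => (s.drop k).take L) := by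
  ext p
  simp only [Finset.mem_sdiff, Finset.mem_image, Finset.mem_Icc, uptoU, Finset.mem_biUnion,
    Finset.mem_range, mem_startsAt]
  constructor
  · rintro ⟨⟨L, h1, h2, rfl⟩, hnot⟩
    refine ⟨L, ⟨?_, h2⟩, rfl⟩
    by_contra hle
    have hLm : L ≤ mB s k := by omega
    rcases mB_cases s k with hz | ⟨j, hj, hjeq⟩
    · omega
    · -- p is also a substring starting at j < k
      have hlcp : L ≤ lcpB (s.drop j) (s.drop k) := by omega
      have htake : (s.drop j).take L = (s.drop k).take L :=
        take_eq_of_le_lcpB _ _ L hlcp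
      exact hnot ⟨j, hj, L, h1, by
        have := lcpB_le_left (s.drop j) (s.drop k)
        simp only [List.length_drop] at this
        omega, htake.symm⟩
  · rintro ⟨L, ⟨hm, h2⟩, rfl⟩
    refine ⟨⟨L, by omega, h2, rfl⟩, ?_⟩
    rintro ⟨j, hj, L', h1', h2', heq⟩
    -- lengths force L' = L
    have hLlen : ((s.drop k).take L).length = L := by
      simp only [List.length_take, List.length_drop]; omega
    have hL'len : ((s.drop j).take L').length = L' := by
      simp only [List.length_take, List.length_drop]; omega
    have hLL' : L = L' := by rw [heq] at hLlen; omega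
    subst hLL'
    have : L ≤ lcpB (s.drop j) (s.drop k) := by
      apply le_lcpB_of_take_eq
      · exact heq.symm ▸ rfl
      · simp only [List.length_drop]; omega
    have := le_mB_of_lt s k j hj
    omega

theorem card_startsAt_sdiff (s : List Char) (k : Nat) (hk : k < s.length) :
    (startsAt s k \ uptoU s k).card = s.length - k - mB s k := by
  rw [startsAt_sdiff s k hk]
  rw [Finset.card_image_of_injOn]
  · rw [Nat.card_Icc]; omega
  · intro L1 hL1 L2 hL2 heq
    simp only [Finset.coe_Icc, Set.mem_Icc] at hL1 hL2
    have heq' : (s.drop k).take L1 = (s.drop k).take L2 := heq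
    have h1 : ((s.drop k).take L1).length = L1 := by
      simp only [List.length_take, List.length_drop]; omega
    have h2 : ((s.drop k).take L2).length = L2 := by
      simp only [List.length_take, List.length_drop]; omega
    rw [heq'] at h1; omega

theorem card_uptoU (s : List Char) : ∀ K, K ≤ s.length →
    (uptoU s K).card = ((List.range K).map (fun k => s.length - k - mB s k)).sum := by
  intro K
  induction K with
  | zero => intro _; simp [uptoU]
  | succ K ih =>
    intro hK
    have hU : uptoU s (K + 1) = startsAt s K ∪ uptoU s K := by
      rw [uptoU, Finset.range_add_one, Finset.biUnion_insert]; rfl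
    rw [hU]
    have := Finset.card_sdiff_add_card (s := startsAt s K) (t := uptoU s K)
    rw [List.range_succ, List.map_append, List.sum_append]
    simp only [List.map_cons, List.map_nil, List.sum_cons, List.sum_nil]
    rw [← ih (by omega)]
    have hc := card_startsAt_sdiff s K (by omega)
    omega

-- ---------- A-side sum equals the same cardinality ----------

theorem toFinset_ofList (xs : List (List Char)) :
    (PySem.Set.ofList xs).toFinset = xs.toFinset := by
  ext p
  simp [List.mem_toFinset, PySem.Set.mem_ofList]

theorem setLen_eq_card (xs : List (List Char)) :
    (PySem.Set.ofList xs).length = xs.toFinset.card := by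
  rw [← toFinset_ofList, List.toFinset_card_of_nodup (PySem.Set.nodup_ofList xs)]

theorem list_range_sum (g : Nat → Nat) (n : Nat) :
    ((List.range n).map g).sum = ∑ j ∈ Finset.range n, g j := by
  induction n with
  | zero => simp
  | succ n ih => rw [List.range_succ, List.map_append, List.sum_append,
      Finset.sum_range_succ, ih]; simp

theorem biUnion_lengths_eq (s : List Char) :
    (Finset.range s.length).biUnion (fun j => (subsOfLen s (j+1)).toFinset) = uptoU s s.length := by
  ext p
  simp only [Finset.mem_biUnion, Finset.mem_range, List.mem_toFinset, uptoU, mem_startsAt,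
    subsOfLen, List.mem_map, List.mem_range]
  constructor
  · rintro ⟨j, hj, nn, hnn, rfl⟩
    exact ⟨nn, by omega, j + 1, by omega, by omega, rfl⟩
  · rintro ⟨k, hk, L, h1, h2, rfl⟩
    exact ⟨L - 1, by omega, k, by omega, by rw [Nat.sub_add_cancel h1]⟩

theorem sumA_eq_card (s : List Char) :
    ((List.range' 1 s.length).map (fun l => (PySem.Set.ofList (subsOfLen s l)).length)).sum =
      (uptoU s s.length).card := by
  have h1 : List.range' 1 s.length = (List.range s.length).map (fun j => j + 1) := by
    rw [List.range'_eq_map_range]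
    apply List.map_congr_left
    intro j _; omega
  rw [h1, List.map_map]
  have h2 : ((List.range s.length).map ((fun l => (PySem.Set.ofList (subsOfLen s l)).length) ∘ (fun j => j + 1))).sum
      = ∑ j ∈ Finset.range s.length, (subsOfLen s (j+1)).toFinset.card := by
    rw [list_range_sum]
    apply Finset.sum_congr rfl
    intro j _
    simp [Function.comp, setLen_eq_card]
  rw [h2, ← biUnion_lengths_eq]
  rw [Finset.card_biUnion]
  intro j1 h1' j2 h2' hne
  simp only [Function.onFun]
  rw [Finset.disjoint_left]
  intro p hp1 hp2
  simp only [List.mem_toFinset] at hp1 hp2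
  have e1 := length_of_mem_subsOfLen s (j1+1)
    (by have := Finset.mem_range.1 (Finset.mem_coe.1 h1'); omega) p hp1
  have e2 := length_of_mem_subsOfLen s (j2+1)
    (by have := Finset.mem_range.1 (Finset.mem_coe.1 h2'); omega) p hp2
  omega

-- ---------- B-side fold equals the same cardinality ----------

theorem find_alt_eq (i : Int) (str : String) :
    find_alt i str =
      ((((List.range (PySem.List.slice str.toList (some 0) (some (i + 1))).length).map
        (fun k => (PySem.List.slice str.toList (some 0) (some (i + 1))).length - k -
          mB (PySem.List.slice str.toList (some 0) (some (i + 1))) k)).sum : Nat) : Int) := by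
  rw [find_alt]
  set s := PySem.List.slice str.toList (some 0) (some (i + 1)) with hs
  simp only [PySem.List.slice_from_natCast]
  simp only [show ∀ k : Nat,
      (List.range k).foldl (fun m j => max m (lcpB (s.drop j) (s.drop k))) 0 = mB s k
    from fun _ => rfl]
  rw [PySem.List.foldl_add (g := fun k : Nat =>
    (s.length : Int) - (k : Int) - ((mB s k : Nat) : Int))]
  · rw [zero_add]
    have : (List.range s.length).map (fun k : Nat =>
        (s.length : Int) - (k : Int) - ((mB s k : Nat) : Int)) =
        (List.range s.length).map (fun k : Nat => ((s.length - k - mB s k : Nat) : Int)) := by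
      apply List.map_congr_left
      intro k hk
      have hk' : k < s.length := List.mem_range.1 hk
      have := mB_le s k
      omega
    rw [this]
    rw [Nat.cast_list_sum, List.map_map]
    rfl

-- ===== VERDICT (by name: the statement is the Claim_ definition above) =====
theorem find_spec : Claim_equal_find := by
  intro i str _
  unfold Spec_find
  rw [find_alt_eq, find]
  have hA := loopA_length (PySem.List.slice str.toList (some 0) (some (i + 1)))
    (PySem.List.slice str.toList (some 0) (some (i + 1))).length 1 (by omega) (by omega) []
    List.nodup_nil (by simp)
  rw [hA]
  rw [List.length_nil, Nat.zero_add, sumA_eq_card,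
    card_uptoU _ _ (le_refl _)]
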